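-- pv_equiv track=rewrite | github.com/avasileios/Advent-of-Code-Solutions | 2015/Day-05-Challenge/day5p2.py | check_repeat_with_gap
-- ===== SOURCE A (Python) =====
-- def check_repeat_with_gap(s: str) -> bool:
--     """
--     Checks for at least one letter which repeats with exactly one letter
--     between them (e.g., xyx, abcdefeghi). (Rule 2)
--     """
--     N = len(s)
--     if N < 3:
--         return False
--
--     # Check for s[i] == s[i+2]
--     for i in range(N - 2):
--         if s[i] == s[i+2]:
--             return True
--
--     return False
-- ===== SOURCE B (Python) =====
-- def check_repeat_with_gap(s: str) -> bool:
--     """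
--     Checks for at least one letter which repeats with exactly one letter
--     between them (e.g., xyx, abcdefeghi). (Rule 2)
--
--     Strategy: a letter repeating with one gap is exactly an ADJACENT
--     duplicate inside one of the two parity subsequences of s (characters
--     at even indices, characters at odd indices), so distribute the
--     characters into two buckets and scan each bucket for a neighbouring
--     equal pair.
--     """
--     buckets = [[], []]
--     i = 0
--     for ch in s:
--         buckets[i].append(ch)
--         i = 1 - i
--     return _has_adjacent_double(buckets[0]) or _has_adjacent_double(buckets[1])
--
--
-- def _has_adjacent_double(t) -> bool:
--     for k in range(len(t) - 1):
--         if t[k] == t[k + 1]: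
--             return True
--     return False
-- ===== Notes on version B (the rewrite author's own statement) =====
-- stated objective: alternative
-- what changed: Instead of one indexed scan comparing s[i] with s[i+2], B first distributes the characters into the two parity subsequences (even indices, odd indices) and then searches each bucket for an adjacent duplicate, which is equivalent because positions at distance two have the same parity and are neighbours in their parity subsequence.
import Mathlib
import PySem

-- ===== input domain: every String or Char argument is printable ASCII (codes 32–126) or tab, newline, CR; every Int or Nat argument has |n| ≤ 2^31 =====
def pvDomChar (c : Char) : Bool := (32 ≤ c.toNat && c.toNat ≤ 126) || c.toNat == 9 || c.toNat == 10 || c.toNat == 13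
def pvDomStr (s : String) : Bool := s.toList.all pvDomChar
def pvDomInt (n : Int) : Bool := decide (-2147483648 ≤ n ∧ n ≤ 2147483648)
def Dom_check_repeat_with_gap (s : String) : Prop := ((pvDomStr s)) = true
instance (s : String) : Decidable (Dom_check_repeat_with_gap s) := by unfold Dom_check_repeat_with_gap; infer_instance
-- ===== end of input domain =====

-- B replaces A's single indexed gap-2 scan by a parity split: distribute the
-- characters into the even-index and odd-index buckets, then look for an
-- ADJACENT duplicate inside either bucket (objective: alternative algorithm).

-- ===== PORT A =====
def check_repeat_with_gap (s : String) : Bool :=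
  let N : Int := PySem.Str.len s
  if N < 3 then false
  else
    (PySem.List.pyRange 0 (N - 2) 1).any (fun i =>
      PySem.Str.pyGet? s i == PySem.Str.pyGet? s (i + 2))

-- ===== PORT B =====
-- one step of B's distribution loop: buckets[i] += ch; i = 1 - i
def pvBucketStep (st : List Char × List Char × Int) (ch : Char) :
    List Char × List Char × Int :=
  let (e, o, i) := st
  if i == 0 then (e ++ [ch], o, 1 - i) else (e, o ++ [ch], 1 - i)

-- B's helper _has_adjacent_double: for k in range(len(t)-1): if t[k]==t[k+1] …
def pvHasAdjacentDouble (t : List Char) : Bool :=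
  (PySem.List.pyRange 0 ((t.length : Int) - 1) 1).any (fun k =>
    PySem.List.pyGet? t k == PySem.List.pyGet? t (k + 1))

def check_repeat_with_gap_alt (s : String) : Bool :=
  let r := s.toList.foldl pvBucketStep ([], [], 0)
  pvHasAdjacentDouble r.1 || pvHasAdjacentDouble r.2.1

-- ===== PRECONDITION & SPEC =====
def Spec_check_repeat_with_gap (s : String) (out : Bool) : Prop := out = check_repeat_with_gap_alt s
instance (s : String) (out : Bool) : Decidable (Spec_check_repeat_with_gap s out) := by unfold Spec_check_repeat_with_gap; infer_instance

-- ===== CLAIM (what is proved, stated in full; the proofs are below) =====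
def Claim_equal_check_repeat_with_gap : Prop := ∀ (s : String), Dom_check_repeat_with_gap s → Spec_check_repeat_with_gap s (check_repeat_with_gap s)

-- ===== LEMMAS AND PROOFS =====

-- proof-side description of the parity split: (evens, odds)
def pvSplitAlt (cs : List Char) : List Char × List Char :=
  match cs with
  | [] => ([], [])
  | a :: r => (a :: (pvSplitAlt r).2, (pvSplitAlt r).1)

theorem pvSplitAlt_length (cs : List Char) :
    (pvSplitAlt cs).1.length = (cs.length + 1) / 2 ∧
    (pvSplitAlt cs).2.length = cs.length / 2 := by
  induction cs with
  | nil => simp [pvSplitAlt]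
  | cons a r ih => simp [pvSplitAlt, ih.1, ih.2]; omega

theorem pvSplitAlt_get (cs : List Char) (j : Nat) :
    (pvSplitAlt cs).1[j]? = cs[2 * j]? ∧
    (pvSplitAlt cs).2[j]? = cs[2 * j + 1]? := by
  induction cs generalizing j with
  | nil => simp [pvSplitAlt]
  | cons a r ih =>
    cases j with
    | zero => exact ⟨by simp [pvSplitAlt], by simpa [pvSplitAlt] using (ih 0).1⟩
    | succ j =>
      refine ⟨?_, ?_⟩
      · simp only [pvSplitAlt, List.getElem?_cons_succ, (ih j).2]
        rw [show 2 * (j + 1) = (2 * j + 1) + 1 from by ring, List.getElem?_cons_succ]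
      · simp only [pvSplitAlt, (ih (j + 1)).1]
        rw [List.getElem?_cons_succ]

-- B's foldl distribution computes pvSplitAlt (both parities of the start flag)
theorem pvFoldl_bucket (cs : List Char) : ∀ (e o : List Char),
    ((cs.foldl pvBucketStep (e, o, 0)).1 = e ++ (pvSplitAlt cs).1 ∧
      (cs.foldl pvBucketStep (e, o, 0)).2.1 = o ++ (pvSplitAlt cs).2) ∧
    ((cs.foldl pvBucketStep (e, o, 1)).1 = e ++ (pvSplitAlt cs).2 ∧
      (cs.foldl pvBucketStep (e, o, 1)).2.1 = o ++ (pvSplitAlt cs).1) := by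
  induction cs with
  | nil => intro e o; simp [pvSplitAlt]
  | cons a r ih =>
    intro e o
    have h0 : pvBucketStep (e, o, 0) a = (e ++ [a], o, 1) := by simp [pvBucketStep]
    have h1 : pvBucketStep (e, o, 1) a = (e, o ++ [a], 0) := by simp [pvBucketStep]
    refine ⟨⟨?_, ?_⟩, ⟨?_, ?_⟩⟩ <;>
      simp [List.foldl_cons, h0, h1, pvSplitAlt,
        ((ih (e ++ [a]) o).2).1, ((ih (e ++ [a]) o).2).2,
        ((ih e (o ++ [a])).1).1, ((ih e (o ++ [a])).1).2]

-- pyRange-any scan over gap g = existence of an in-range equal pair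
theorem pvScan_iff (t : List Char) (g : Nat) :
    ((PySem.List.pyRange 0 ((t.length : Int) - g) 1).any (fun k =>
        PySem.List.pyGet? t k == PySem.List.pyGet? t (k + g)) = true) ↔
      ∃ j, j + g < t.length ∧ t[j]? = t[j + g]? := by
  have hcast : ∀ j : Nat, ((j : Int) + (g : Int)) = (((j + g : Nat)) : Int) := by
    intro j; push_cast; ring
  by_cases h : g ≤ t.length
  · have hn : ((t.length : Int) - g) = ((t.length - g : Nat) : Int) := by omega
    rw [hn, PySem.List.pyRange_zero_natCast]
    rw [List.any_map]
    simp only [List.any_eq_true, List.mem_range, Function.comp_apply]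
    constructor
    · rintro ⟨j, hj, hp⟩
      refine ⟨j, by omega, ?_⟩
      rw [hcast j, PySem.List.pyGet?_natCast, PySem.List.pyGet?_natCast] at hp
      exact beq_iff_eq.mp hp
    · rintro ⟨j, hj, hp⟩
      refine ⟨j, by omega, ?_⟩
      rw [hcast j, PySem.List.pyGet?_natCast, PySem.List.pyGet?_natCast, hp]
      simp
  · have hempty : PySem.List.pyRange 0 ((t.length : Int) - g) 1 = [] :=
      PySem.List.pyRange_one_eq_nil (by omega)
    rw [hempty]
    simp only [List.any_nil]
    constructor
    · intro hh; exact absurd hh (by decide)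
    · rintro ⟨j, hj, -⟩; exfalso; omega

-- B's helper characterised: an adjacent duplicate exists
theorem pvHasAdjacentDouble_iff (t : List Char) :
    pvHasAdjacentDouble t = true ↔ ∃ j, j + 1 < t.length ∧ t[j]? = t[j + 1]? := by
  unfold pvHasAdjacentDouble
  simpa using pvScan_iff t 1

-- A characterised: some position repeats with one gap
theorem pvA_iff (s : String) :
    check_repeat_with_gap s = true ↔
      ∃ i, i + 2 < s.toList.length ∧ s.toList[i]? = s.toList[i + 2]? := by
  unfold check_repeat_with_gap
  have hlen : (PySem.Str.len s : Int) = (s.toList.length : Int) := by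
    simp [PySem.Str.len_eq]
  by_cases h3 : (PySem.Str.len s : Int) < 3
  · rw [if_pos h3]
    simp only [Bool.false_eq_true, false_iff]
    rintro ⟨i, hi, -⟩
    rw [hlen] at h3
    omega
  · rw [if_neg h3]
    rw [hlen] at h3 ⊢
    have hfun : (fun k => PySem.Str.pyGet? s k == PySem.Str.pyGet? s (k + 2)) =
        (fun k => PySem.List.pyGet? s.toList k == PySem.List.pyGet? s.toList (k + 2)) := by
      funext k; simp [PySem.Str.pyGet?_eq]
    rw [hfun]
    simpa using pvScan_iff s.toList 2

-- ===== VERDICT (by name: the statement is the Claim_ definition above) =====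
theorem check_repeat_with_gap_spec : Claim_equal_check_repeat_with_gap := by
  intro s _
  unfold Spec_check_repeat_with_gap check_repeat_with_gap_alt
  set cs := s.toList with hcs
  have hf1 := ((pvFoldl_bucket cs [] []).1).1
  have hf2 := ((pvFoldl_bucket cs [] []).1).2
  rw [Bool.eq_iff_iff, pvA_iff]
  rw [show s.toList = cs from rfl]
  simp only [hf1, hf2, List.nil_append, Bool.or_eq_true,
    pvHasAdjacentDouble_iff]
  have hE := pvSplitAlt_get cs
  have hlen := pvSplitAlt_length cs
  constructor
  · rintro ⟨i, hi, heq⟩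
    rcases Nat.even_or_odd i with ⟨j, hj⟩ | ⟨j, hj⟩
    · left
      refine ⟨j, by omega, ?_⟩
      rw [(hE j).1, (hE (j + 1)).1]
      rw [show 2 * j = i from by omega, show 2 * (j + 1) = i + 2 from by omega]
      exact heq
    · right
      refine ⟨j, by omega, ?_⟩
      rw [(hE j).2, (hE (j + 1)).2]
      rw [show 2 * j + 1 = i from by omega, show 2 * (j + 1) + 1 = i + 2 from by omega]
      exact heq
  · rintro (⟨j, hj, heq⟩ | ⟨j, hj, heq⟩)
    · refine ⟨2 * j, by omega, ?_⟩
      rw [← (hE j).1, ← show 2 * (j + 1) = 2 * j + 2 from by ring, ← (hE (j + 1)).1]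
      exact heq
    · refine ⟨2 * j + 1, by omega, ?_⟩
      rw [← (hE j).2, ← show 2 * (j + 1) + 1 = 2 * j + 1 + 2 from by ring, ← (hE (j + 1)).2]
      exact heq
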